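-- pv_equiv track=rewrite | github.com/shubhampachori12110095/irelia | game/korean_chess_v1.py | compress_state_key
-- ===== SOURCE A (Python) =====
-- def compress_state_key(state_key):
--     empty_cnt = 0
--     state_key_list = []
--     for piece in state_key.split(','):
--         if piece == '0':
--             empty_cnt += 1
--         else:
--             if empty_cnt > 0:
--                 state_key_list.append(str(empty_cnt))
--                 empty_cnt = 0
--             state_key_list.append(piece)
--     if empty_cnt > 0:
--         state_key_list.append(str(empty_cnt))
--
--     return ','.join(state_key_list)
-- ===== SOURCE B (Python) =====
-- def compress_state_key(state_key):
--     # Pass 1: run-length encode the pieces into (value, count) pairs.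
--     runs = []
--     for piece in state_key.split(','):
--         if runs and runs[-1][0] == piece:
--             runs[-1] = (piece, runs[-1][1] + 1)
--         else:
--             runs.append((piece, 1))
--     # Pass 2: map each run to output pieces.
--     out = []
--     for piece, cnt in runs:
--         if piece == '0':
--             out.append(str(cnt))
--         else:
--             out.extend([piece] * cnt)
--     return ','.join(out)
-- ===== Notes on version B (the rewrite author's own statement) =====
-- stated objective: alternative
-- what changed: Replaces A's single pass with a running zero-counter flushed at branch boundaries by a two-pass run-length grouping: first build (value, count) runs for all pieces, then map each run to output ('0'-runs become their count, other runs are repeated).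
import Mathlib
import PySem

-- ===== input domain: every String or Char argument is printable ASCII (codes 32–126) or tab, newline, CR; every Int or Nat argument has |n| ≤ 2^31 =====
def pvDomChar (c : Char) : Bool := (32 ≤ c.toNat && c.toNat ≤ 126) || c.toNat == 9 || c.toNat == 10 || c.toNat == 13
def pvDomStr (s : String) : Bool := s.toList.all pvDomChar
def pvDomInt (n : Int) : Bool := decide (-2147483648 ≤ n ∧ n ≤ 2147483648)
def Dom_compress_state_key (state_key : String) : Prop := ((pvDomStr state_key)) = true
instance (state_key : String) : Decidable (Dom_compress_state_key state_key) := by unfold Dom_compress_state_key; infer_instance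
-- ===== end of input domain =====

-- B replaces A's running zero-counter (flushed at branch boundaries) by a two-pass
-- run-length grouping: build (value, count) runs first, then map each run to output pieces.
-- Same return value for every input; objective: alternative decomposition.

-- ===== PORT A =====
-- loop body of A: state = (empty_cnt, state_key_list)
def stepA (st : Int × List String) (piece : String) : Int × List String :=
  if piece == "0" then (st.1 + 1, st.2)
  else if st.1 > 0 then (0, (st.2 ++ [PySem.Int.toStr st.1]) ++ [piece])
  else (st.1, st.2 ++ [piece])

def compress_state_key (state_key : String) : String :=
  let st : Int × List String := ((PySem.Str.split? state_key ",").getD []).foldl stepA ((0 : Int), ([] : List String))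
  PySem.Str.join "," (if st.1 > 0 then st.2 ++ [PySem.Int.toStr st.1] else st.2)

-- ===== PORT B =====
-- loop body of B's first pass: bump the count of the last run or open a new run
def rleStep (runs : List (String × Int)) (piece : String) : List (String × Int) :=
  match runs.getLast? with
  | some (p, c) => if p == piece then runs.dropLast ++ [(piece, c + 1)] else runs ++ [(piece, 1)]
  | none => runs ++ [(piece, 1)]

def compress_state_key_alt (state_key : String) : String :=
  let runs : List (String × Int) := ((PySem.Str.split? state_key ",").getD []).foldl rleStep ([] : List (String × Int))
  PySem.Str.join "," (runs.foldl (fun out pc =>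
      if pc.1 == "0" then out ++ [PySem.Int.toStr pc.2]
      else out ++ List.replicate pc.2.toNat pc.1) [])

-- ===== PRECONDITION & SPEC =====
def Spec_compress_state_key (state_key : String) (out : String) : Prop := out = compress_state_key_alt state_key
instance (state_key : String) (out : String) : Decidable (Spec_compress_state_key state_key out) := by unfold Spec_compress_state_key; infer_instance

-- ===== CLAIM (what is proved, stated in full; the proofs are below) =====
def Claim_equal_compress_state_key : Prop := ∀ (state_key : String), Dom_compress_state_key state_key → Spec_compress_state_key state_key (compress_state_key state_key)

-- ===== LEMMAS AND PROOFS =====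

-- length of the leading run of p, and the list after it
def lead (p : String) : List String → Nat
  | [] => 0
  | q :: t => if q = p then lead p t + 1 else 0

def tailAfter (p : String) : List String → List String
  | [] => []
  | q :: t => if q = p then tailAfter p t else q :: t

lemma decomp (p : String) : ∀ l : List String, List.replicate (lead p l) p ++ tailAfter p l = l := by
  intro l
  induction l with
  | nil => rfl
  | cons q t ih =>
    by_cases h : q = p
    · simp [lead, tailAfter, h, List.replicate_succ] at *
      exact ih
    · simp [lead, tailAfter, h]

lemma tailAfter_head (p : String) : ∀ l q t, tailAfter p l = q :: t → q ≠ p := by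
  intro l
  induction l with
  | nil => intro q t h; simp [tailAfter] at h
  | cons r s ih =>
    intro q t h
    by_cases hr : r = p
    · simp [tailAfter, hr] at h; exact ih q t h
    · simp [tailAfter, hr] at h; exact h.1 ▸ hr

lemma length_tailAfter (p : String) : ∀ l : List String, (tailAfter p l).length ≤ l.length := by
  intro l
  induction l with
  | nil => simp [tailAfter]
  | cons q t ih =>
    by_cases h : q = p
    · simp [tailAfter, h]; omega
    · simp [tailAfter, h]

-- pure recursive characterization of A's remaining output given pending zero count c
def outA : List String → Int → List String
  | [], c => if c > 0 then [PySem.Int.toStr c] else []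
  | p :: t, c =>
    if p = "0" then outA t (c + 1)
    else (if c > 0 then [PySem.Int.toStr c] else []) ++ p :: outA t 0

lemma loopA_eq (l : List String) : ∀ (c : Int) (acc : List String), 0 ≤ c →
    (let st := l.foldl stepA (c, acc);
     if st.1 > 0 then st.2 ++ [PySem.Int.toStr st.1] else st.2) = acc ++ outA l c := by
  induction l with
  | nil => intro c acc _; simp only [List.foldl_nil, outA]; split_ifs <;> simp
  | cons p t ih =>
    intro c acc hc0
    by_cases hp : p = "0"
    · simp only [List.foldl_cons, stepA, hp, outA, beq_self_eq_true, if_true]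
      exact ih (c + 1) acc (by omega)
    · by_cases hc : c > 0
      · simp only [List.foldl_cons, stepA, beq_iff_eq, hp, if_false, if_pos hc, outA]
        rw [ih 0 ((acc ++ [PySem.Int.toStr c]) ++ [p]) le_rfl]
        simp
      · have hz : c = 0 := by omega
        subst hz
        simp only [List.foldl_cons, stepA, beq_iff_eq, hp, if_false, if_neg hc, outA]
        rw [ih 0 (acc ++ [p]) le_rfl]
        simp

lemma rleStep_append (rs : List (String × Int)) (p : String) (c : Int) (x : String) :
    rleStep (rs ++ [(p, c)]) x = rs ++ rleStep [(p, c)] x := by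
  simp only [rleStep, List.getLast?_append, List.getLast?_singleton]
  by_cases h : p = x
  · simp [h]
  · simp [h]

lemma rle_shift (l : List String) : ∀ (rs : List (String × Int)) (p : String) (c : Int),
    l.foldl rleStep (rs ++ [(p, c)]) = rs ++ l.foldl rleStep [(p, c)] := by
  induction l with
  | nil => intro rs p c; simp
  | cons x t ih =>
    intro rs p c
    simp only [List.foldl_cons, rleStep_append]
    rcases hr : rleStep [(p, c)] x with _ | ⟨⟨q, d⟩, rest⟩
    · simp [rleStep] at hr; split at hr <;> simp_all
    · have : rest = [] ∨ ∃ rs' q' d', rest = rs' ++ [(q', d')] := by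
        rcases List.eq_nil_or_concat rest with h | ⟨rs', a, h⟩
        · exact Or.inl h
        · exact Or.inr ⟨rs', a.1, a.2, by simpa using h⟩
      rcases this with h | ⟨rs', q', d', h⟩
      · subst h
        have : rs ++ [(q, d)] = (rs ++ []) ++ [(q, d)] := by simp
        rw [this, ih (rs ++ []) q d]
        simp
      · subst h
        rw [show rs ++ ((q, d) :: (rs' ++ [(q', d')])) = (rs ++ (q, d) :: rs') ++ [(q', d')] by simp,
            ih (rs ++ (q, d) :: rs') q' d',
            show ((q, d) : String × Int) :: (rs' ++ [(q', d')]) = ((q, d) :: rs') ++ [(q', d')] by simp,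
            ih ((q, d) :: rs') q' d']
        simp

lemma rle_run (l : List String) : ∀ (p : String) (c : Int),
    l.foldl rleStep [(p, c)] = (p, c + (lead p l : Int)) :: (tailAfter p l).foldl rleStep [] := by
  induction l with
  | nil => intro p c; simp [lead, tailAfter]
  | cons q t ih =>
    intro p c
    by_cases hq : q = p
    · subst hq
      simp only [List.foldl_cons, rleStep, List.getLast?_singleton, beq_self_eq_true, if_true,
        lead, tailAfter]
      rw [show ([(q, c)] : List (String × Int)).dropLast ++ [(q, c + 1)] = [(q, c + 1)] from rfl]
      rw [ih q (c + 1)]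
      push_cast
      ring_nf
    · have hpq : ¬ p = q := fun h => hq h.symm
      simp only [List.foldl_cons, rleStep, List.getLast?_singleton, beq_iff_eq, if_neg hpq,
        lead, tailAfter, if_neg hq]
      rw [rle_shift t [(p, c)] q 1]
      simp

def chunk (pc : String × Int) : List String :=
  if pc.1 == "0" then [PySem.Int.toStr pc.2] else List.replicate pc.2.toNat pc.1

lemma expand_eq (runs : List (String × Int)) : ∀ acc : List String,
    runs.foldl (fun out pc =>
      if pc.1 == "0" then out ++ [PySem.Int.toStr pc.2]
      else out ++ List.replicate pc.2.toNat pc.1) acc = acc ++ runs.flatMap chunk := by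
  induction runs with
  | nil => intro acc; simp
  | cons pc rest ih =>
    intro acc
    simp only [List.foldl_cons, List.flatMap_cons]
    by_cases h : pc.1 = "0"
    · rw [if_pos (by simp [h]), ih]
      simp [chunk, h]
    · rw [if_neg (by simp [h]), ih]
      simp [chunk, h]

lemma outA_zeros : ∀ (k : Nat) (rest : List String) (c : Int),
    outA (List.replicate k "0" ++ rest) c = outA rest (c + k) := by
  intro k
  induction k with
  | zero => intro rest c; simp
  | succ k ih =>
    intro rest c
    simp only [List.replicate_succ, List.cons_append, outA]
    rw [ih rest (c + 1)]
    push_cast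
    ring_nf

lemma outA_flush : ∀ (rest : List String) (m : Int), (∀ q t, rest = q :: t → q ≠ "0") → 0 < m →
    outA rest m = PySem.Int.toStr m :: outA rest 0 := by
  intro rest m h hm
  cases rest with
  | nil => simp [outA, hm]
  | cons q t =>
    have hq : q ≠ "0" := h q t rfl
    simp [outA, hq, hm]

lemma outA_copy (p : String) (hp : p ≠ "0") : ∀ (k : Nat) (rest : List String),
    outA (List.replicate k p ++ rest) 0 = List.replicate k p ++ outA rest 0 := by
  intro k
  induction k with
  | zero => intro rest; simp
  | succ k ih =>
    intro rest
    simp only [List.replicate_succ, List.cons_append, outA, if_neg hp]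
    rw [ih rest]
    simp

lemma cons_rep_comm {A : Type} (p : A) : ∀ (k : Nat) (X : List A),
    p :: (List.replicate k p ++ X) = List.replicate k p ++ p :: X := by
  intro k
  induction k with
  | zero => intro X; simp
  | succ k ih => intro X; simp [List.replicate_succ, ih]

lemma main_lemma : ∀ (n : Nat) (l : List String), l.length ≤ n →
    outA l 0 = (l.foldl rleStep []).flatMap chunk := by
  intro n
  induction n with
  | zero =>
    intro l hl
    have : l = [] := List.eq_nil_of_length_eq_zero (Nat.le_zero.mp hl)
    subst this; rfl
  | succ n ih =>
    intro l hl
    cases l with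
    | nil => rfl
    | cons p t =>
      have hfold : List.foldl rleStep [] (p :: t)
          = (p, 1 + (lead p t : Int)) :: (tailAfter p t).foldl rleStep [] := by
        simp only [List.foldl_cons]
        rw [show rleStep [] p = [(p, 1)] from rfl]
        exact rle_run t p 1
      have hdec := decomp p t
      have hlen := length_tailAfter p t
      have hrest : (tailAfter p t).length ≤ n := by
        simp at hl; omega
      by_cases hp : p = "0"
      · subst hp
        have h1 : outA ("0" :: t) 0 = outA (tailAfter "0" t) (1 + (lead "0" t : Int)) := by
          simp only [outA]
          calc outA t 1 = outA (List.replicate (lead "0" t) "0" ++ tailAfter "0" t) 1 := by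
                rw [hdec]
            _ = outA (tailAfter "0" t) (1 + (lead "0" t : Int)) := outA_zeros _ _ 1
        rw [h1, outA_flush _ _ (tailAfter_head "0" t) (by positivity), hfold]
        simp only [List.flatMap_cons, chunk, beq_self_eq_true, if_true, List.singleton_append]
        rw [ih _ hrest]
      · have h1 : outA (p :: t) 0 = p :: (List.replicate (lead p t) p ++ outA (tailAfter p t) 0) := by
          simp only [outA, if_neg hp]
          rw [show ¬ (0 : Int) > 0 by omega |> if_neg, List.nil_append]
          congr 1
          calc outA t 0 = outA (List.replicate (lead p t) p ++ tailAfter p t) 0 := by rw [hdec]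
            _ = _ := outA_copy p hp _ _
        rw [h1, hfold]
        simp only [List.flatMap_cons, chunk, if_neg (by simp [hp] : ¬ (p == "0") = true)]
        rw [ih _ hrest]
        have hc : ((1 + (lead p t : Int)).toNat) = lead p t + 1 := by omega
        rw [hc, List.replicate_succ']
        simp
        exact cons_rep_comm p _ _

-- ===== VERDICT (by name: the statement is the Claim_ definition above) =====
theorem compress_state_key_spec : Claim_equal_compress_state_key := by
  intro s _
  unfold Spec_compress_state_key compress_state_key compress_state_key_alt
  dsimp only
  have hA := loopA_eq ((PySem.Str.split? s ",").getD []) 0 [] le_rfl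
  simp only [List.nil_append] at hA
  rw [hA, expand_eq _ [], List.nil_append,
      main_lemma ((PySem.Str.split? s ",").getD []).length _ le_rfl]
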